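-- pv_equiv track=rewrite | github.com/pypi-data/pypi-mirror-354 | packages/dh-pyspark/dh_pyspark-0.4.4-py3-none-any.whl/dataheroes/data/utils.py | _update_col_indexes
-- ===== SOURCE A (Python) =====
-- def _update_col_indexes(column_indexes, removed_column_indexes):
--     """
--     Updates column_indexes list to point to the same location in the new dataset after removing columns in
--     removed_column_indexes list.
--     """
--     if not removed_column_indexes:
--         return column_indexes
--     return [
--         (index - sum(1 for removed in removed_column_indexes if removed < index))
--         for index in column_indexes
--         if index not in removed_column_indexes
--     ]
-- ===== SOURCE B (Python) =====
-- def _update_col_indexes(column_indexes, removed_column_indexes):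
--     """
--     Updates column_indexes list to point to the same location in the new dataset after removing columns in
--     removed_column_indexes list.
--     """
--     removed_set = set(removed_column_indexes)
--     sorted_removed = sorted(removed_column_indexes)
--
--     def _bisect_left(a, x):
--         lo, hi = 0, len(a)
--         while lo < hi:
--             mid = (lo + hi) // 2
--             if a[mid] < x:
--                 lo = mid + 1
--             else:
--                 hi = mid
--         return lo
--
--     return [i - _bisect_left(sorted_removed, i)
--             for i in column_indexes if i not in removed_set]
-- ===== Notes on version B (the rewrite author's own statement) =====
-- stated objective: faster
-- what changed: Replaces the per-index linear scans (membership test plus sum over removed) with a set for membership and a sorted removed list queried by hand-written binary search to count removed indexes below each index.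
import Mathlib
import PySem

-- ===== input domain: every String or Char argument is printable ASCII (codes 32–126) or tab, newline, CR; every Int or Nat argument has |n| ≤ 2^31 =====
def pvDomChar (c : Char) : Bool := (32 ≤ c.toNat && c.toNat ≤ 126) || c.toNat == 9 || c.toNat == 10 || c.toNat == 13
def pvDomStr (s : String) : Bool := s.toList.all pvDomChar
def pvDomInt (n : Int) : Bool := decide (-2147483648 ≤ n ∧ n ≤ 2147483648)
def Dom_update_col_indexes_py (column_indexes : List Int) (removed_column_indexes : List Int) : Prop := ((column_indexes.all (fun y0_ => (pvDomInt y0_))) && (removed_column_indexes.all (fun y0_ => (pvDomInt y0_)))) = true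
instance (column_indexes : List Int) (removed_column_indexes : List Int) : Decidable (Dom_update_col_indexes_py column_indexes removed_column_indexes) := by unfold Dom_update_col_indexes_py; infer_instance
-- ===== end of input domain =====

-- B replaces A's per-index linear scans with a set membership test and a binary search
-- over the sorted removed list; equivalence of the return values is proved on Dom.
-- ===== PORT A =====
def update_col_indexes_py (column_indexes : List Int) (removed_column_indexes : List Int) : List Int :=
  if removed_column_indexes = [] then column_indexes
  else
    (column_indexes.filter (fun index => !removed_column_indexes.contains index)).map
      (fun index =>
        index - ((removed_column_indexes.countP (fun removed => decide (removed < index)) : Nat) : Int))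

-- ===== PORT B =====
-- hand-written bisect_left from Source B, step for step (the while loop as recursion on hi - lo);
-- a.getD mid 0 is exact here because Python only reads a[mid] with 0 <= mid < len(a)
def pyBisectLeft (a : List Int) (x : Int) (lo hi : Nat) : Nat :=
  if lo < hi then
    let mid := (lo + hi) / 2
    if a.getD mid 0 < x then pyBisectLeft a x (mid + 1) hi
    else pyBisectLeft a x lo mid
  else lo
termination_by hi - lo
decreasing_by all_goals omega

def update_col_indexes_py_alt (column_indexes : List Int) (removed_column_indexes : List Int) : List Int :=
  let removedSet := PySem.Set.ofList removed_column_indexes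
  let sortedRemoved := PySem.List.sorted removed_column_indexes (fun x => x) false
  (column_indexes.filter (fun i => !removedSet.contains i)).map
    (fun i => i - ((pyBisectLeft sortedRemoved i 0 sortedRemoved.length : Nat) : Int))

-- ===== PRECONDITION & SPEC =====
def Spec_update_col_indexes_py (column_indexes : List Int) (removed_column_indexes : List Int) (out : List Int) : Prop := out = update_col_indexes_py_alt column_indexes removed_column_indexes
instance (column_indexes : List Int) (removed_column_indexes : List Int) (out : List Int) : Decidable (Spec_update_col_indexes_py column_indexes removed_column_indexes out) := by unfold Spec_update_col_indexes_py; infer_instance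

-- ===== CLAIM (what is proved, stated in full; the proofs are below) =====
def Claim_equal_update_col_indexes_py : Prop := ∀ (column_indexes : List Int) (removed_column_indexes : List Int), Dom_update_col_indexes_py column_indexes removed_column_indexes → Spec_update_col_indexes_py column_indexes removed_column_indexes (update_col_indexes_py column_indexes removed_column_indexes)

-- ===== LEMMAS AND PROOFS =====

-- if a predicate holds exactly on the first m positions of ys, its countP is m
lemma countP_eq_of_prefix (p : Int → Bool) :
    ∀ (ys : List Int) (m : Nat), m ≤ ys.length →
      (∀ (k : Nat) (hk : k < ys.length), p ys[k] = true ↔ k < m) →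
      ys.countP p = m := by
  intro ys
  induction ys with
  | nil => intro m hm _; simp at hm; simp [hm]
  | cons y t ih =>
    intro m hm hp
    cases m with
    | zero =>
      have h0 : p y = false := by
        have := hp 0 (by simp)
        simpa using this
      have ht : t.countP p = 0 := by
        rw [List.countP_eq_zero]
        intro a ha
        obtain ⟨k, hk, rfl⟩ := List.mem_iff_getElem.mp ha
        intro hpa
        exact absurd ((hp (k+1) (by simpa using Nat.succ_lt_succ hk)).mp (by simpa using hpa)) (by omega)
      simp [h0, ht]
    | succ m' =>
      have hy : p y = true := (hp 0 (by simp)).mpr (by omega)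
      have ht : t.countP p = m' := by
        apply ih m' (by simpa using hm)
        intro k hk
        have := hp (k+1) (by simpa using Nat.succ_lt_succ hk)
        simpa [Nat.succ_lt_succ_iff] using this
      simp [hy, ht]

-- correctness of the hand-written binary search on a sorted list:
-- with the stated invariants it returns countP (· < x)
lemma pyBisectLeft_eq_countP (ys : List Int) (x : Int)
    (hs : ys.Pairwise (· ≤ ·)) :
    ∀ (n lo hi : Nat), hi - lo ≤ n → lo ≤ hi → hi ≤ ys.length →
      (∀ (k : Nat) (hk : k < ys.length), k < lo → ys[k] < x) →
      (∀ (k : Nat) (hk : k < ys.length), hi ≤ k → ¬ ys[k] < x) →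
      pyBisectLeft ys x lo hi = ys.countP (fun r => decide (r < x)) := by
  have hmono : ∀ (p q : Nat) (hq : q < ys.length) (hpq : p ≤ q), ys[p]'(by omega) ≤ ys[q] := by
    intro p q hq hpq
    rcases Nat.lt_or_ge p q with h | h
    · exact (List.pairwise_iff_getElem.mp hs) p q (by omega) hq h
    · have : p = q := by omega
      subst this; exact le_refl _
  intro n
  induction n with
  | zero =>
    intro lo hi hn hlh hhl hlt hge
    have : lo = hi := by omega
    subst this
    rw [pyBisectLeft]
    simp only [lt_irrefl, if_false]
    refine (countP_eq_of_prefix _ ys lo (by omega) ?_).symm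
    intro k hk
    constructor
    · intro hpk
      by_contra hko
      exact absurd (by simpa using hpk) (hge k hk (by omega))
    · intro hko
      simpa using hlt k hk hko
  | succ n ih =>
    intro lo hi hn hlh hhl hlt hge
    by_cases h : lo < hi
    · rw [pyBisectLeft]
      simp only [h, if_true]
      have hmidlt : (lo + hi) / 2 < ys.length := by omega
      have hgd : ys.getD ((lo + hi) / 2) 0 = ys[(lo + hi) / 2] := by
        rw [List.getD_eq_getElem?_getD, List.getElem?_eq_getElem hmidlt]; rfl
      by_cases hm : ys.getD ((lo + hi) / 2) 0 < x
      · simp only [hm, if_true]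
        apply ih ((lo + hi) / 2 + 1) hi (by omega) (by omega) hhl
        · intro k hk hklt
          calc ys[k] ≤ ys[(lo + hi) / 2] := hmono k _ hmidlt (by omega)
            _ < x := by rwa [hgd] at hm
        · exact hge
      · simp only [hm, if_false]
        apply ih lo ((lo + hi) / 2) (by omega) (by omega) (by omega) hlt
        intro k hk hkge
        have h1 : ys[(lo + hi) / 2] ≤ ys[k] := hmono _ k hk hkge
        rw [hgd] at hm
        omega
    · exact ih lo hi (by omega) hlh hhl hlt hge

lemma pyBisectLeft_full (ys : List Int) (x : Int) (hs : ys.Pairwise (· ≤ ·)) :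
    pyBisectLeft ys x 0 ys.length = ys.countP (fun r => decide (r < x)) := by
  apply pyBisectLeft_eq_countP ys x hs ys.length 0 ys.length (by omega) (by omega) (le_refl _)
  · intro k hk h; omega
  · intro k hk h; omega

-- ===== VERDICT (by name: the statement is the Claim_ definition above) =====
theorem update_col_indexes_py_spec : Claim_equal_update_col_indexes_py := by
  intro cols rem _
  show update_col_indexes_py cols rem = update_col_indexes_py_alt cols rem
  unfold update_col_indexes_py update_col_indexes_py_alt
  have hsortP : (PySem.List.sorted rem (fun x => x) false).Pairwise (· ≤ ·) := by
    simpa using PySem.List.sorted_pairwise rem (fun x => x)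
  have hperm : (PySem.List.sorted rem (fun x => x) false).Perm rem :=
    PySem.List.sorted_perm rem (fun x => x) false
  have hcnt : ∀ i : Int,
      pyBisectLeft (PySem.List.sorted rem (fun x => x) false) i 0
        (PySem.List.sorted rem (fun x => x) false).length
        = rem.countP (fun r => decide (r < i)) := by
    intro i
    rw [pyBisectLeft_full _ _ hsortP, hperm.countP_eq]
  have hmem : ∀ i : Int, (PySem.Set.ofList rem).contains i = rem.contains i := by
    intro i
    by_cases h : i ∈ rem
    · simp [h, (PySem.Set.mem_ofList rem i).mpr h]
    · simp [h]
  by_cases hrem : rem = []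
  · subst hrem
    simp only [if_true]
    simp [PySem.Set.ofList, pyBisectLeft]
  · simp only [hrem, if_false]
    have hfilter : cols.filter (fun i => !rem.contains i)
        = cols.filter (fun i => !(PySem.Set.ofList rem).contains i) :=
      List.filter_congr (fun i _ => by rw [hmem i])
    rw [hfilter]
    exact (List.map_congr_left (fun i _ => by rw [hcnt i])).symm
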